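-- pv_equiv track=rewrite | github.com/ianlayzer/adventofcode2022 | code/01.py | getMostCalories
-- ===== SOURCE A (Python) =====
-- def getMostCalories(lines):
--     maxCount = 0
--     currCount = 0
--     for l in lines:
--         if l == '':
--             maxCount = max(maxCount, currCount)
--             currCount = 0
--         else:
--             currCount += int(l)
--     maxCount = max(maxCount, currCount)
--     return maxCount
-- ===== SOURCE B (Python) =====
-- def getMostCalories(lines):
--     # parse into groups of ints first, then take the max over group sums (seeded with 0)
--     groups = []
--     curr = []
--     for l in lines:
--         if l == '':
--             groups.append(curr)
--             curr = []
--         else: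
--             curr.append(int(l))
--     groups.append(curr)
--     best = 0
--     for g in groups:
--         best = max(best, sum(g))
--     return best
-- ===== Notes on version B (the rewrite author's own statement) =====
-- stated objective: alternative
-- what changed: B parses the lines into a list of integer groups first, then takes the max of the group sums seeded with 0, instead of A's single pass with a running current count and running max.
import Mathlib
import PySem

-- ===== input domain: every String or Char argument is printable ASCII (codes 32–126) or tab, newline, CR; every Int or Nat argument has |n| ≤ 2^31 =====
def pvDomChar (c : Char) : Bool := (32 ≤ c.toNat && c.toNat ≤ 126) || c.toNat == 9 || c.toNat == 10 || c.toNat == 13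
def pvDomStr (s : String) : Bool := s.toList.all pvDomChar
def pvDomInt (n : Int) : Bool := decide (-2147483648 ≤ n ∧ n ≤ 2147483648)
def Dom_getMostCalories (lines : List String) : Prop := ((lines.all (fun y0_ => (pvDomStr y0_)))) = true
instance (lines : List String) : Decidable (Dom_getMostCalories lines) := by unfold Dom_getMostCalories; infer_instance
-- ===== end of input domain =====

-- B parses lines into a list of integer groups first, then takes the max of group sums seeded with 0 (alternative decomposition, same cost as A).


-- ===== PORT A =====
def getMostCalories (lines : List String) : Int :=
  let st := lines.foldl (fun (st : Int × Int) l =>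
      if l = "" then (max st.1 st.2, 0)
      else (st.1, st.2 + (PySem.Int.ofStr? l).getD 0)) (0, 0)
  max st.1 st.2

-- ===== PORT B =====
def getMostCalories_alt (lines : List String) : Int :=
  let st := lines.foldl (fun (st : List (List Int) × List Int) l =>
      if l = "" then (st.1 ++ [st.2], [])
      else (st.1, st.2 ++ [(PySem.Int.ofStr? l).getD 0])) ([], [])
  let groups := st.1 ++ [st.2]
  groups.foldl (fun b g => max b (g.foldl (· + ·) 0)) 0

-- ===== PRECONDITION & SPEC =====
-- Pre_ excludes exactly the inputs where A raises ValueError: a non-empty line that int() rejects.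
def Pre_getMostCalories (lines : List String) : Prop :=
  ∀ l ∈ lines, l ≠ "" → (PySem.Int.ofStr? l).isSome
instance (lines : List String) : Decidable (Pre_getMostCalories lines) := by
  unfold Pre_getMostCalories; infer_instance
def pvWitness_getMostCalories : List String := ["1", "2", "", "3"]
def Spec_getMostCalories (lines : List String) (out : Int) : Prop := out = getMostCalories_alt lines
instance (lines : List String) (out : Int) : Decidable (Spec_getMostCalories lines out) := by unfold Spec_getMostCalories; infer_instance

-- ===== CLAIM (what is proved, stated in full; the proofs are below) =====
def Claim_equal_getMostCalories : Prop := ∀ (lines : List String), Dom_getMostCalories lines → Pre_getMostCalories lines → Spec_getMostCalories lines (getMostCalories lines)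

-- ===== LEMMAS AND PROOFS =====

-- sum of a group, max of group sums (as B's second phase computes them)
def pvSum (g : List Int) : Int := g.foldl (· + ·) 0
def pvMx (gs : List (List Int)) : Int := gs.foldl (fun b g => max b (pvSum g)) 0

lemma pvSum_append_one (g : List Int) (v : Int) : pvSum (g ++ [v]) = pvSum g + v := by
  simp [pvSum, List.foldl_append]

lemma pvMx_append_one (gs : List (List Int)) (g : List Int) :
    pvMx (gs ++ [g]) = max (pvMx gs) (pvSum g) := by
  simp [pvMx, List.foldl_append]

lemma pv_main (lines : List String) :
    ∀ (gs : List (List Int)) (cur : List Int),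
      (let st := lines.foldl (fun (st : Int × Int) l =>
          if l = "" then (max st.1 st.2, 0)
          else (st.1, st.2 + (PySem.Int.ofStr? l).getD 0)) (pvMx gs, pvSum cur)
       max st.1 st.2)
      =
      (let st := lines.foldl (fun (st : List (List Int) × List Int) l =>
          if l = "" then (st.1 ++ [st.2], [])
          else (st.1, st.2 ++ [(PySem.Int.ofStr? l).getD 0])) (gs, cur)
       pvMx (st.1 ++ [st.2])) := by
  induction lines with
  | nil =>
    intro gs cur
    simp [pvMx_append_one]
  | cons l rest ih =>
    intro gs cur
    by_cases h : l = ""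
    · simp only [List.foldl_cons, h]
      have h0 : max (pvMx gs) (pvSum cur) = pvMx (gs ++ [cur]) := by
        rw [pvMx_append_one]
      have h1 : (0 : Int) = pvSum [] := by simp [pvSum]
      rw [h0, h1]
      exact ih (gs ++ [cur]) []
    · simp only [List.foldl_cons, h]
      have h1 : pvSum cur + (PySem.Int.ofStr? l).getD 0
          = pvSum (cur ++ [(PySem.Int.ofStr? l).getD 0]) := by
        rw [pvSum_append_one]
      rw [h1]
      exact ih gs (cur ++ [(PySem.Int.ofStr? l).getD 0])

-- ===== VERDICT (by name: the statement is the Claim_ definition above) =====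
theorem getMostCalories_spec : Claim_equal_getMostCalories := by
  intro lines _ _
  unfold Spec_getMostCalories getMostCalories getMostCalories_alt
  have h := pv_main lines [] []
  simpa [pvMx, pvSum] using h
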